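-- pv_equiv track=rewrite | github.com/alphaomega-labs/run-0d306e30-0640-4768-acc8-fa5b5aaced11 | code/core.py | _sample_param_grid
-- ===== SOURCE A (Python) =====
-- from typing import Dict, List
--
-- def _sample_param_grid(sweep_params: Dict[str, List[str]], max_cases: int = 24) -> List[Dict[str, str]]:
--     keys = sorted(sweep_params.keys())
--     values = [sweep_params[k] for k in keys]
--     sampled: List[Dict[str, str]] = []
--     for i in range(max_cases):
--         row = {}
--         for idx, (k, vals) in enumerate(zip(keys, values)):
--             # Cyclic coverage guarantees every categorical mode appears in bounded samples.
--             row[k] = vals[(i + idx) % len(vals)]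
--         sampled.append(row)
--     return sampled
-- ===== SOURCE B (Python) =====
-- from typing import Dict, List
--
-- def _sample_param_grid(sweep_params: Dict[str, List[str]], max_cases: int = 24) -> List[Dict[str, str]]:
--     # Stateful cyclic iterators: each key carries a rotating buffer (staggered by its
--     # position); every row reads the buffer heads, then every buffer rotates one step.
--     # No per-cell modulo indexing.
--     if max_cases <= 0:
--         return []
--     state = []
--     for j, k in enumerate(sorted(sweep_params)):
--         vals = sweep_params[k]
--         r = j % len(vals)
--         state.append((k, vals[r:] + vals[:r]))
--     sampled = []
--     for _ in range(max_cases):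
--         sampled.append({k: buf[0] for k, buf in state})
--         state = [(k, buf[1:] + buf[:1]) for k, buf in state]
--     return sampled
-- ===== Notes on version B (the rewrite author's own statement) =====
-- stated objective: alternative
-- what changed: B replaces A's per-cell modulo-index arithmetic with stateful cyclic iterators: each sorted key gets a rotating buffer (staggered once by its position), every row is read off the buffer heads and then each buffer rotates one step; A instead recomputes vals[(i+idx) % len] for every cell.
import Mathlib
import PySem

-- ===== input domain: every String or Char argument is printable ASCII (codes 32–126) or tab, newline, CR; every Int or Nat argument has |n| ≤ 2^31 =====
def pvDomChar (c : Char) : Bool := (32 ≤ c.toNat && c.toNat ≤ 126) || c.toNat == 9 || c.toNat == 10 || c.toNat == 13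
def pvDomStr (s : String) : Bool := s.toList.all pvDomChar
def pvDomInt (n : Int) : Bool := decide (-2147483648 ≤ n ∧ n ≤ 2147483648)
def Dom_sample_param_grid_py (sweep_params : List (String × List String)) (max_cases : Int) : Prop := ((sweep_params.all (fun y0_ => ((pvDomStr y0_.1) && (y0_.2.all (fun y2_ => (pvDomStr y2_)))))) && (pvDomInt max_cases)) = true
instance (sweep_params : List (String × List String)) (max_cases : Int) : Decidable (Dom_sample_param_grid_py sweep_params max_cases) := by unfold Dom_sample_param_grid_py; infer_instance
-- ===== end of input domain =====

-- B replaces A's per-cell modulo indexing by stateful cyclic iterators: one rotating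
-- buffer per sorted key (staggered once by its position); each row reads the buffer
-- heads, then every buffer rotates one step. Alternative decomposition, same cost class.

-- ===== PORT A =====
-- row-by-row: for i in range(max_cases), build the row dict by inserting each key's sampled value
def sample_param_grid_py (sweep_params : List (String × List String)) (max_cases : Int) : List (List (String × String)) :=
  let d := PySem.Dict.ofList sweep_params
  let keys := PySem.List.sorted (PySem.Dict.keys d) (fun k => k) false
  let values := keys.map (fun k => PySem.Dict.getD d k [])
  (PySem.List.pyRange 0 max_cases 1).foldl
    (fun sampled i =>
      let row := (PySem.List.enumerate (keys.zip values) 0).foldl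
        (fun row p =>
          PySem.Dict.insert row p.2.1
            (PySem.List.pyGetD p.2.2 (PySem.Int.mod (i + p.1) (PySem.List.len p.2.2)) ""))
        PySem.Dict.empty
      sampled ++ [row.items]) []

-- ===== PORT B =====
-- stateful cyclic iterators: init the staggered buffers, then per row read heads and rotate
def sample_param_grid_py_alt (sweep_params : List (String × List String)) (max_cases : Int) : List (List (String × String)) :=
  if max_cases ≤ 0 then []
  else
    let d := PySem.Dict.ofList sweep_params
    let state := (PySem.List.enumerate (PySem.List.sorted (PySem.Dict.keys d) (fun k => k) false) 0).map
      (fun p =>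
        let vals := PySem.Dict.getD d p.2 []
        let r := PySem.Int.mod p.1 (PySem.List.len vals)
        (p.2, PySem.List.slice vals (some r) none ++ PySem.List.slice vals none (some r)))
    ((PySem.List.pyRange 0 max_cases 1).foldl
      (fun acc _ =>
        (acc.1 ++ [(acc.2.foldl
            (fun row q => PySem.Dict.insert row q.1 (PySem.List.pyGetD q.2 0 "")) PySem.Dict.empty).items],
         acc.2.map (fun q => (q.1, PySem.List.slice q.2 (some 1) none ++ PySem.List.slice q.2 none (some 1)))))
      ([], state)).1

-- ===== PRECONDITION & SPEC =====
-- Pre_ excludes exactly the inputs where the Python A raises ZeroDivisionError: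
-- max_cases > 0 while some parameter of the dict has an empty value list.
def Pre_sample_param_grid_py (sweep_params : List (String × List String)) (max_cases : Int) : Prop :=
  max_cases ≤ 0 ∨ ∀ p ∈ (PySem.Dict.ofList sweep_params).items, p.2 ≠ []
instance (sweep_params : List (String × List String)) (max_cases : Int) : Decidable (Pre_sample_param_grid_py sweep_params max_cases) := by unfold Pre_sample_param_grid_py; infer_instance
def pvWitness_sample_param_grid_py : (List (String × List String)) × Int :=
  ([("b", ["u"]), ("a", ["x", "y"])], 3)
def Spec_sample_param_grid_py (sweep_params : List (String × List String)) (max_cases : Int) (out : List (List (String × String))) : Prop := out = sample_param_grid_py_alt sweep_params max_cases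
instance (sweep_params : List (String × List String)) (max_cases : Int) (out : List (List (String × String))) : Decidable (Spec_sample_param_grid_py sweep_params max_cases out) := by unfold Spec_sample_param_grid_py; infer_instance

-- ===== CLAIM (what is proved, stated in full; the proofs are below) =====
def Claim_equal_sample_param_grid_py : Prop := ∀ (sweep_params : List (String × List String)) (max_cases : Int), Dom_sample_param_grid_py sweep_params max_cases → Pre_sample_param_grid_py sweep_params max_cases → Spec_sample_param_grid_py sweep_params max_cases (sample_param_grid_py sweep_params max_cases)

-- ===== LEMMAS AND PROOFS =====

-- two dict-building folds agree when the inserted (key, value) pairs agree positionally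
theorem pv_fold_ins {A B : Type} (gk : A → String) (gv : A → String)
    (hk : B → String) (hv : B → String) :
    ∀ (lA : List A) (lB : List B) (e : PySem.Dict String String),
      lA.map (fun x => (gk x, gv x)) = lB.map (fun y => (hk y, hv y)) →
      lA.foldl (fun d x => PySem.Dict.insert d (gk x) (gv x)) e
        = lB.foldl (fun d y => PySem.Dict.insert d (hk y) (hv y)) e := by
  intro lA
  induction lA with
  | nil =>
    intro lB e h
    cases lB with
    | nil => rfl
    | cons b bs => simp at h
  | cons a as ih =>
    intro lB e h
    cases lB with
    | nil => simp at h
    | cons b bs =>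
      simp only [List.map_cons, List.cons.injEq, Prod.mk.injEq] at h
      obtain ⟨⟨h1, h2⟩, h3⟩ := h
      simp only [List.foldl_cons, h1, h2]
      exact ih bs _ h3

-- the append/step pair-fold over any driver list is the map of the iterated step over List.range
theorem pv_pairfold {σ ρ : Type} (g : σ → σ) (h : σ → ρ) :
    ∀ (l : List Int) (out : List ρ) (s : σ),
      (l.foldl (fun acc (_ : Int) => (acc.1 ++ [h acc.2], g acc.2)) (out, s)).1
        = out ++ (List.range l.length).map (fun t => h (g^[t] s)) := by
  intro l
  induction l with
  | nil => intro out s; simp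
  | cons x xs ih =>
    intro out s
    simp only [List.foldl_cons, List.length_cons, List.range_succ_eq_map]
    rw [ih]
    simp [Function.iterate_succ_apply, List.map_map, Function.comp_def]

-- one step of B's rotation on a nonempty buffer is List.rotate by 1
theorem pv_step_rotate (l : List String) (hl : l ≠ []) :
    PySem.List.slice l (some 1) none ++ PySem.List.slice l none (some 1) = l.rotate 1 := by
  rw [PySem.List.slice_from_one, PySem.List.slice_to l (by norm_num)]
  rw [List.rotate_eq_drop_append_take (by cases l <;> simp_all)]
  simp [List.drop_one]

-- B's staggered initial buffer for index j is List.rotate by j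
theorem pv_init_rotate (l : List String) (hl : l ≠ []) (j : Int) (hj : 0 ≤ j) :
    PySem.List.slice l (some (PySem.Int.mod j (PySem.List.len l))) none
      ++ PySem.List.slice l none (some (PySem.Int.mod j (PySem.List.len l)))
      = l.rotate j.toNat := by
  have hL : 0 < l.length := List.length_pos_iff.mpr hl
  have hm : PySem.Int.mod j (PySem.List.len l) = ((j.toNat % l.length : Nat) : Int) := by
    rw [PySem.List.len_eq, PySem.Int.mod_eq_emod_of_pos (by exact_mod_cast hL)]
    push_cast
    rw [Int.toNat_of_nonneg hj]
  rw [hm, PySem.List.slice_from_natCast, PySem.List.slice_to_natCast]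
  rw [← List.rotate_mod, List.rotate_eq_drop_append_take (le_of_lt (Nat.mod_lt _ hL))]

-- the iterated step applied to the initial state: every buffer is vals rotated by (t + j)
theorem pv_state_char (keys : List String) (vals : String → List String)
    (hne : ∀ k ∈ keys, vals k ≠ []) (t : Nat) :
    (fun (s : List (String × List String)) =>
        s.map (fun q => (q.1, PySem.List.slice q.2 (some 1) none ++ PySem.List.slice q.2 none (some 1))))^[t]
      ((PySem.List.enumerate keys 0).map (fun p => (p.2, (vals p.2).rotate p.1.toNat)))
    = (PySem.List.enumerate keys 0).map (fun p => (p.2, (vals p.2).rotate (t + p.1.toNat))) := by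
  induction t with
  | zero => simp
  | succ t ih =>
    rw [Function.iterate_succ_apply', ih, List.map_map]
    apply List.map_congr_left
    intro p hp
    have hk : p.2 ∈ keys := by
      have := congrArg (fun l => p.2 ∈ l) (PySem.List.map_snd_enumerate keys 0)
      simp only [eq_iff_iff] at this
      exact this.mp (List.mem_map_of_mem hp)
    have hnil : (vals p.2).rotate (t + p.1.toNat) ≠ [] := by
      intro h
      exact hne _ hk (by simpa using congrArg List.length h)
    simp only [Function.comp_def]
    rw [pv_step_rotate _ hnil, List.rotate_rotate]
    congr 2
    omega

-- the head of a rotated nonempty buffer is the cyclically sampled element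
theorem pv_head_rotate (l : List String) (hl : l ≠ []) (n : Nat) :
    PySem.List.pyGetD (l.rotate n) 0 "" = l[n % l.length]'(Nat.mod_lt _ (List.length_pos_iff.mpr hl)) := by
  have hL : 0 < l.length := List.length_pos_iff.mpr hl
  have h0 : 0 < (l.rotate n).length := by simpa [List.length_rotate]
  rw [PySem.List.pyGetD_zero, List.getD_eq_getElem _ _ h0, List.getElem_rotate]
  simp

-- main equality for positive max_cases under nonempty value lists
theorem pv_main (sweep_params : List (String × List String)) (max_cases : Int)
    (hpos : ¬ max_cases ≤ 0)
    (hpre : ∀ p ∈ (PySem.Dict.ofList sweep_params).items, p.2 ≠ []) :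
    sample_param_grid_py sweep_params max_cases = sample_param_grid_py_alt sweep_params max_cases := by
  unfold sample_param_grid_py sample_param_grid_py_alt
  rw [if_neg hpos]
  set d := PySem.Dict.ofList sweep_params with hd
  set keys := PySem.List.sorted (PySem.Dict.keys d) (fun k => k) false with hkeys
  have hne : ∀ k ∈ keys, PySem.Dict.getD d k [] ≠ [] := by
    intro k hk
    have hk' : k ∈ PySem.Dict.keys d := (PySem.List.mem_sorted _ _ _ _).mp hk
    obtain ⟨p, hp, hpk⟩ := List.mem_map.mp hk'
    have hget : PySem.Dict.getD d p.1 [] = p.2 :=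
      PySem.Dict.getD_of_mem_items d (by simpa using hp)
        (PySem.Dict.nodup_keys_ofList sweep_params) []
    rw [← hpk, hget]
    exact hpre p hp
  -- B side: pair fold → map of iterates → characterized states
  rw [pv_pairfold
    (g := fun (s : List (String × List String)) =>
      s.map (fun q => (q.1, PySem.List.slice q.2 (some 1) none ++ PySem.List.slice q.2 none (some 1))))
    (h := fun (s : List (String × List String)) =>
      (s.foldl (fun row q => PySem.Dict.insert row q.1 (PySem.List.pyGetD q.2 0 "")) PySem.Dict.empty).items)]
  simp only [List.nil_append]
  -- initial state is the rotated-buffer state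
  have hinit : (PySem.List.enumerate keys 0).map
      (fun p =>
        (p.2, PySem.List.slice (PySem.Dict.getD d p.2 []) (some (PySem.Int.mod p.1 (PySem.List.len (PySem.Dict.getD d p.2 [])))) none
          ++ PySem.List.slice (PySem.Dict.getD d p.2 []) none (some (PySem.Int.mod p.1 (PySem.List.len (PySem.Dict.getD d p.2 []))))))
      = (PySem.List.enumerate keys 0).map
        (fun p => (p.2, (PySem.Dict.getD d p.2 []).rotate p.1.toNat)) := by
    apply List.map_congr_left
    intro p hp
    have hk : p.2 ∈ keys := by
      have := congrArg (fun l => p.2 ∈ l) (PySem.List.map_snd_enumerate keys 0)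
      simp only [eq_iff_iff] at this
      exact this.mp (List.mem_map_of_mem hp)
    have hj : 0 ≤ p.1 := by
      have := congrArg (fun l => p.1 ∈ l) (PySem.List.map_fst_enumerate keys 0)
      simp only [eq_iff_iff] at this
      have hmem := this.mp (List.mem_map_of_mem hp)
      exact ((PySem.List.mem_pyRange_one).mp hmem).1
    rw [pv_init_rotate _ (hne _ hk) _ hj]
  rw [hinit]
  -- A side: append fold → map over pyRange → align the two maps
  rw [PySem.List.foldl_append_singleton_eq_map]
  simp only [List.nil_append]
  rw [PySem.List.pyRange_one]
  simp only [Int.sub_zero, List.map_map, List.length_map, List.length_range]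
  apply List.map_congr_left
  intro t ht
  have htmc : t < max_cases.toNat := List.mem_range.mp ht
  simp only [Function.comp_def]
  rw [pv_state_char keys (fun k => PySem.Dict.getD d k []) hne t]
  -- per-row: both dict folds insert the same (key, value) pairs
  apply congrArg PySem.Dict.items
  apply pv_fold_ins
    (gk := fun (x : Int × (String × List String)) => x.2.1)
    (gv := fun (x : Int × (String × List String)) =>
      PySem.List.pyGetD x.2.2 (PySem.Int.mod ((0 + (t : Int)) + x.1) (PySem.List.len x.2.2)) "")
    (hk := fun (y : String × List String) => y.1)
    (hv := fun (y : String × List String) => PySem.List.pyGetD y.2 0 "")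
  refine List.ext_getElem ?_ ?_
  · simp [PySem.List.length_enumerate, hkeys, PySem.List.length_sorted]
  · intro n h1 h2
    have hn : n < keys.length := by
      simpa [PySem.List.length_enumerate, hkeys, PySem.List.length_sorted] using h1
    simp only [List.getElem_map, PySem.List.getElem_enumerate, List.getElem_zip, zero_add,
      Prod.mk.injEq, ← hkeys]
    refine ⟨trivial, ?_⟩
    have hknil : PySem.Dict.getD d keys[n] [] ≠ [] := hne _ (List.getElem_mem hn)
    have hL : 0 < (PySem.Dict.getD d keys[n] []).length := List.length_pos_iff.mpr hknil
    rw [pv_head_rotate _ hknil]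
    have hmod : PySem.Int.mod ((t : Int) + (n : Int)) (PySem.List.len (PySem.Dict.getD d keys[n] []))
        = (((t + n) % (PySem.Dict.getD d keys[n] []).length : Nat) : Int) := by
      rw [PySem.List.len_eq, PySem.Int.mod_eq_emod_of_pos (by exact_mod_cast hL)]
      push_cast
      ring_nf
    rw [hmod, PySem.List.pyGetD_natCast,
      List.getD_eq_getElem _ _ (by exact Nat.mod_lt _ hL)]
    simp

-- ===== VERDICT (by name: the statement is the Claim_ definition above) =====
theorem sample_param_grid_py_spec : Claim_equal_sample_param_grid_py := by
  intro sp mc _ hpre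
  unfold Spec_sample_param_grid_py
  by_cases hpos : mc ≤ 0
  · unfold sample_param_grid_py sample_param_grid_py_alt
    rw [if_pos hpos, PySem.List.pyRange_one_eq_nil (by omega)]
    rfl
  · rcases hpre with h | h
    · exact absurd h hpos
    · exact pv_main sp mc hpos h
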